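-- pv_equiv track=rewrite | github.com/Alexandrina-Kuzeleva/MPSU_Python | functions/14.py | add_brackets
-- ===== SOURCE A (Python) =====
-- def add_brackets(s):
--     n = len(s)
--     if n <= 2:
--         if n == 1:
--             return s
--         else:
--             return f"({s})" if n == 2 else s
--
--     return s[0] + '(' + add_brackets(s[1:-1]) + ')' + s[-1]
-- ===== SOURCE B (Python) =====
-- def add_brackets(s):
--     n = len(s)
--     left = []
--     right = []
--     i, j = 0, n - 1
--     while j - i >= 2:
--         left.append(s[i])
--         left.append('(')
--         right.append(s[j])
--         right.append(')')
--         i += 1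
--         j -= 1
--     if j - i == 1:
--         mid = '(' + s[i] + s[j] + ')'
--     elif i == j:
--         mid = s[i]
--     else:
--         mid = ''
--     right.reverse()
--     return ''.join(left) + mid + ''.join(right)
-- ===== Notes on version B (the rewrite author's own statement) =====
-- stated objective: faster
-- what changed: Replaced the O(n^2) recursion that re-slices the string at each level with a single two-pointer loop that collects the left prefix, right suffix and middle in one pass and joins once.
import Mathlib
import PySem

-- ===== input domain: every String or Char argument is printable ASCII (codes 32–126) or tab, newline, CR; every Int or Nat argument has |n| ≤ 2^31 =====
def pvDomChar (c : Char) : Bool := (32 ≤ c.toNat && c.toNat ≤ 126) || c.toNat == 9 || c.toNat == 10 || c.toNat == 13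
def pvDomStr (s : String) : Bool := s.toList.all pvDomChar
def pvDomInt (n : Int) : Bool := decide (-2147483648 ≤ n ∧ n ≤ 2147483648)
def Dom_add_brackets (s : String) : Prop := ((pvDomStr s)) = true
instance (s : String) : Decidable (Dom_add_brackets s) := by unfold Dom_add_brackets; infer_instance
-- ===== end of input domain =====

-- B replaces A's recursion with repeated slicing by a single two-pointer pass; return values proved equal on all inputs.

-- ===== PORT A =====
-- A recurses on s[1:-1]; ported on List Char (PySem string functions are defined there).
-- s[0] / s[-1] are only read when n ≥ 3, where they are in range, so pyGetD is exact there.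
def pvAddA (l : List Char) : List Char :=
  if l.length ≤ 2 then
    if l.length = 1 then l
    else if l.length = 2 then '(' :: l ++ [')'] else l
  else
    PySem.List.pyGetD l 0 ' ' :: '(' ::
      (pvAddA (PySem.List.slice l (some 1) (some (-1))) ++ ')' :: [PySem.List.pyGetD l (-1) ' '])
termination_by l.length
decreasing_by
  rw [PySem.List.length_slice]
  simp only [PySem.List.clampIdx_neg_one]
  have h1 : PySem.List.clampIdx l.length 1 = min 1 l.length := by
    simp
  omega

def add_brackets (s : String) : String := String.ofList (pvAddA s.toList)

-- ===== PORT B =====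
-- the while loop of Source B: state (left, right, i, j); per-iteration appends, single join at the end.
-- s[i] / s[j] are only read in range (proved below), so pyGetD is exact there.
def pvBLoop (l : List Char) (i j : Int) (left right : List Char) :
    List Char × List Char × Int × Int :=
  if 2 ≤ j - i then
    pvBLoop l (i + 1) (j - 1)
      (left ++ [PySem.List.pyGetD l i ' ', '('])
      (right ++ [PySem.List.pyGetD l j ' ', ')'])
  else (left, right, i, j)
termination_by (j - i).toNat
decreasing_by omega

-- the mid computation after Source B's loop
def pvMid (l : List Char) (i j : Int) : List Char :=
  if j - i = 1 then '(' :: PySem.List.pyGetD l i ' ' :: PySem.List.pyGetD l j ' ' :: [')']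
  else if i = j then [PySem.List.pyGetD l i ' ']
  else []

def add_brackets_alt (s : String) : String :=
  let l := s.toList
  let r := pvBLoop l 0 ((l.length : Int) - 1) [] []
  String.ofList (r.1 ++ pvMid l r.2.2.1 r.2.2.2 ++ r.2.1.reverse)

-- ===== PRECONDITION & SPEC =====
def Spec_add_brackets (s : String) (out : String) : Prop := out = add_brackets_alt s
instance (s : String) (out : String) : Decidable (Spec_add_brackets s out) := by unfold Spec_add_brackets; infer_instance

-- ===== CLAIM (what is proved, stated in full; the proofs are below) =====
def Claim_equal_add_brackets : Prop := ∀ (s : String), Dom_add_brackets s → Spec_add_brackets s (add_brackets s)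

-- ===== LEMMAS AND PROOFS =====

-- the segment l[i..j] (inclusive): the part of the string B's loop has not yet consumed
def pvSeg (l : List Char) (i j : Int) : List Char :=
  (l.drop i.toNat).take (j - i + 1).toNat

lemma pvSeg_cons (l : List Char) (i j : Int) (hi : 0 ≤ i) (hij : i ≤ j)
    (hj : j < (l.length : Int)) :
    pvSeg l i j = l[i.toNat]'(by omega) :: pvSeg l (i + 1) j := by
  unfold pvSeg
  rw [List.drop_eq_getElem_cons (by omega)]
  have h1 : (j - i + 1).toNat = (j - (i + 1) + 1).toNat + 1 := by omega
  have h2 : (i + 1).toNat = i.toNat + 1 := by omega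
  rw [h1, h2, List.take_succ_cons]

lemma pvSeg_snoc (l : List Char) (i j : Int) (hi : 0 ≤ i) (hij : i ≤ j)
    (hj : j < (l.length : Int)) :
    pvSeg l i j = pvSeg l i (j - 1) ++ [l[j.toNat]'(by omega)] := by
  unfold pvSeg
  have h1 : (j - i + 1).toNat = (j - 1 - i + 1).toNat + 1 := by omega
  rw [h1, List.take_add_one]
  congr 1
  have hlt : (j - 1 - i + 1).toNat < (l.drop i.toNat).length := by
    simp [List.length_drop]; omega
  rw [List.getElem?_eq_getElem hlt]
  simp only [List.getElem_drop, Option.toList_some]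
  congr 2
  omega

lemma pvSeg_len (l : List Char) (i j : Int) :
    (pvSeg l i j).length = min (j - i + 1).toNat (l.length - i.toNat) := by
  unfold pvSeg
  simp [List.length_drop]

lemma pvSeg_full (l : List Char) : pvSeg l 0 ((l.length : Int) - 1) = l := by
  unfold pvSeg
  simp

-- slicing l[1:-1] off a list shaped a :: m ++ [b]
lemma pvSlice_mid (a b : Char) (m : List Char) :
    PySem.List.slice (a :: m ++ [b]) (some 1) (some (-1)) = m := by
  simp [PySem.List.slice, PySem.List.clampIdx]
  rw [if_neg (by omega)]
  simp

-- A's recursion step, on a list with both ends exposed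
lemma pvAddA_peel (a b : Char) (m : List Char) (hm : m ≠ []) :
    pvAddA (a :: m ++ [b]) = a :: '(' :: (pvAddA m ++ ')' :: [b]) := by
  have h1 : 0 < m.length := List.length_pos_iff.mpr hm
  rw [pvAddA]
  rw [if_neg (by simp; omega)]
  rw [pvSlice_mid]
  have h2 : PySem.List.pyGetD (a :: m ++ [b]) 0 ' ' = a := PySem.List.pyGetD_zero_cons a (m ++ [b]) ' '
  have h3 : PySem.List.pyGetD (a :: m ++ [b]) (-1) ' ' = b := by
    rw [show a :: m ++ [b] = (a :: m) ++ [b] by simp]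
    exact PySem.List.pyGetD_neg_one_append_singleton (a :: m) b ' '
  rw [h2, h3]

-- A on the leftover segment when B's loop exits
lemma pvMid_eq (l : List Char) (i j : Int) (h2 : j - i < 2) (hi : 0 ≤ i)
    (hj : j ≤ (l.length : Int) - 1) :
    pvMid l i j = pvAddA (pvSeg l i j) := by
  unfold pvMid
  rcases lt_trichotomy (j - i) 1 with hlt | heq | hgt
  · rw [if_neg (by omega)]
    by_cases hij : i = j
    · subst hij
      rw [if_pos rfl]
      rw [pvSeg_cons l i i hi le_rfl (by omega)]
      have hnil : pvSeg l (i + 1) i = [] := by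
        unfold pvSeg
        simp
      rw [hnil, PySem.List.pyGetD_eq_getElem l ' ' hi (by omega)]
      rw [pvAddA]
      simp
    · rw [if_neg hij]
      have hnil : pvSeg l i j = [] := by
        unfold pvSeg
        have : (j - i + 1).toNat = 0 := by omega
        simp [this]
      rw [hnil, pvAddA]
      simp
  · rw [if_pos heq]
    have hij : i < j := by omega
    rw [pvSeg_cons l i j hi (by omega) (by omega)]
    rw [pvSeg_cons l (i + 1) j (by omega) (by omega) (by omega)]
    have hnil : pvSeg l (i + 1 + 1) j = [] := by
      unfold pvSeg
      have : (j - (i + 1 + 1) + 1).toNat = 0 := by omega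
      simp [this]
    rw [hnil]
    have hji : (i + 1).toNat = j.toNat := by omega
    rw [PySem.List.pyGetD_eq_getElem l ' ' hi (by omega),
        PySem.List.pyGetD_eq_getElem l ' ' (by omega : (0:Int) ≤ j) (by omega)]
    rw [pvAddA]
    simp [hji]
  · omega

-- the loop invariant: finishing from state (i, j, left, right) yields left ++ A(segment) ++ reverse right
lemma pvBLoop_spec (l : List Char) :
    ∀ (n : Nat) (i j : Int) (left right : List Char), (j - i).toNat ≤ n →
      0 ≤ i → j ≤ (l.length : Int) - 1 →
      (pvBLoop l i j left right).1 ++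
        pvMid l (pvBLoop l i j left right).2.2.1 (pvBLoop l i j left right).2.2.2 ++
        (pvBLoop l i j left right).2.1.reverse
      = left ++ pvAddA (pvSeg l i j) ++ right.reverse := by
  intro n
  induction n with
  | zero =>
    intro i j left right hle hi hj
    rw [pvBLoop, if_neg (by omega)]
    rw [pvMid_eq l i j (by omega) hi hj]
  | succ n ih =>
    intro i j left right hle hi hj
    by_cases h2 : 2 ≤ j - i
    · rw [pvBLoop, if_pos h2]
      rw [ih (i + 1) (j - 1) _ _ (by omega) (by omega) (by omega)]
      have hseg : pvAddA (pvSeg l i j)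
          = l[i.toNat]'(by omega) :: '(' ::
              (pvAddA (pvSeg l (i + 1) (j - 1)) ++ ')' :: [l[j.toNat]'(by omega)]) := by
        rw [pvSeg_cons l i j hi (by omega) (by omega),
            pvSeg_snoc l (i + 1) j (by omega) (by omega) (by omega)]
        apply pvAddA_peel
        have := pvSeg_len l (i + 1) (j - 1)
        intro hnil
        rw [hnil] at this
        simp at this
        omega
      rw [hseg,
          PySem.List.pyGetD_eq_getElem l ' ' hi (by omega),
          PySem.List.pyGetD_eq_getElem l ' ' (by omega : (0:Int) ≤ j) (by omega)]
      simp
    · rw [pvBLoop, if_neg h2]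
      rw [pvMid_eq l i j (by omega) hi hj]

-- ===== VERDICT (by name: the statement is the Claim_ definition above) =====
theorem add_brackets_spec : Claim_equal_add_brackets := by
  intro s _
  unfold Spec_add_brackets add_brackets add_brackets_alt
  have h := pvBLoop_spec s.toList (((s.toList.length : Int) - 1) - 0).toNat 0
    ((s.toList.length : Int) - 1) [] [] le_rfl le_rfl (by omega)
  rw [pvSeg_full] at h
  simp only [List.nil_append, List.append_nil, List.reverse_nil] at h
  simp only []
  rw [h]
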